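-- pv_equiv track=rewrite | github.com/chelsea2002/SchemaRAG | main.py | convert_schema_links_to_set
-- ===== SOURCE A (Python) =====
-- def convert_schema_links_to_set(schema_links):
--     """
--     Convert schema_links to set format for ParetoOptimal usage
--
--     Parameters:
--     schema_links: Schema links in list, string, or other formats
--
--     Returns:
--     set: Set containing all schema elements
--     """
--     schema_set = set()
--
--     if isinstance(schema_links, list):
--         for link in schema_links:
--             if isinstance(link, str):
--                 # Handle table.column format
--                 if '.' in link:
--                     parts = link.split('.')
--                     schema_set.update(parts)
--                 else:
--                     schema_set.add(link)
--     elif isinstance(schema_links, str):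
--         # If it's a string, try to parse
--         if '.' in schema_links:
--             parts = schema_links.split('.')
--             schema_set.update(parts)
--         else:
--             schema_set.add(schema_links)
--
--     return schema_set
-- ===== SOURCE B (Python) =====
-- def convert_schema_links_to_set(schema_links):
--     """Flatten schema links into a set by scanning characters and cutting at '.'."""
--     if isinstance(schema_links, str):
--         schema_links = [schema_links]
--     elif not isinstance(schema_links, list):
--         schema_links = []
--     schema_set = set()
--     for link in schema_links:
--         if not isinstance(link, str):
--             continue
--         token = ''
--         for ch in link:
--             if ch == '.':
--                 schema_set.add(token)
--                 token = ''
--             else: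
--                 token += ch
--         schema_set.add(token)
--     return schema_set
-- ===== Notes on version B (the rewrite author's own statement) =====
-- stated objective: alternative
-- what changed: Replaces the per-link dot-membership test plus split('.') with a single character-level scan that accumulates a token and emits it at each '.' boundary, so no split or substring search is performed at all.
import Mathlib
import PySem

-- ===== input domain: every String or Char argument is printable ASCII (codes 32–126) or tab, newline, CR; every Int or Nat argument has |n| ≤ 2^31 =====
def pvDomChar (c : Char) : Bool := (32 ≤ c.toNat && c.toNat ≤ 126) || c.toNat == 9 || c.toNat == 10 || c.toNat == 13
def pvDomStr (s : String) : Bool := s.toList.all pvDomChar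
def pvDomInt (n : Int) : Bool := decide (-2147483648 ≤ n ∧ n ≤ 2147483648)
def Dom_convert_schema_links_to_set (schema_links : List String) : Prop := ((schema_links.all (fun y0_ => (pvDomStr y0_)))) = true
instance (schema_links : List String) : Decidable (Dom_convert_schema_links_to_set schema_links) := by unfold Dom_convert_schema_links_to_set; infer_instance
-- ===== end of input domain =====

-- B replaces A's dot-membership test + split('.') per link by a character-level scan
-- that accumulates a token and emits it at each '.'; objective: alternative algorithm.


-- ===== PORT A =====
-- A loops over the links; for each it either updates the set with the '.'-split parts
-- (when '.' occurs in the link) or adds the link itself.  The input type fixes the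
-- isinstance branches: every element is a str, so only the list branch is reachable.
-- split('.') has a non-empty separator, so split? is always some; .getD [] totalises.
def convert_schema_links_to_set (schema_links : List String) : List String :=
  schema_links.foldl
    (fun schema_set link =>
      if PySem.Str.isIn "." link then
        PySem.Set.update schema_set ((PySem.Str.split? link ".").getD [])
      else
        PySem.Set.add schema_set link)
    PySem.Set.empty

-- ===== PORT B =====
-- character-level tokenizer: scan each link's characters, accumulating the current
-- token (as List Char, the Chars-level form of Python's token += ch) and adding it
-- to the set at every '.' and once at the end of the link.
def convert_schema_links_to_set_alt (schema_links : List String) : List String :=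
  schema_links.foldl
    (fun schema_set link =>
      let st := link.toList.foldl
        (fun (p : PySem.Set String × List Char) ch =>
          if ch = '.' then (PySem.Set.add p.1 (String.ofList p.2), [])
          else (p.1, p.2 ++ [ch]))
        (schema_set, [])
      PySem.Set.add st.1 (String.ofList st.2))
    PySem.Set.empty

-- ===== PRECONDITION & SPEC =====
def Spec_convert_schema_links_to_set (schema_links : List String) (out : List String) : Prop := out = convert_schema_links_to_set_alt schema_links
instance (schema_links : List String) (out : List String) : Decidable (Spec_convert_schema_links_to_set schema_links out) := by unfold Spec_convert_schema_links_to_set; infer_instance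

-- ===== CLAIM (what is proved, stated in full; the proofs are below) =====
def Claim_equal_convert_schema_links_to_set : Prop := ∀ (schema_links : List String), Dom_convert_schema_links_to_set schema_links → Spec_convert_schema_links_to_set schema_links (convert_schema_links_to_set schema_links)

-- ===== LEMMAS AND PROOFS =====

-- proof-side recursive characterisation of splitting on '.'
def pvTok : List Char → List Char → List (List Char)
  | cur, [] => [cur]
  | cur, c :: rest => if c = '.' then cur :: pvTok [] rest else pvTok (cur ++ [c]) rest

theorem go_eq_tok (fuel : Nat) (l cur : List Char) (acc : List (List Char))
    (hf : l.length < fuel) :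
    PySem.Chars.splitOn.go ['.'] fuel l cur acc = acc.reverse ++ pvTok cur.reverse l := by
  induction fuel generalizing l cur acc with
  | zero => omega
  | succ n ih =>
    cases l with
    | nil => simp [PySem.Chars.splitOn.go, pvTok]
    | cons c rest =>
      rw [PySem.Chars.splitOn.go]
      by_cases hc : c = '.'
      · subst hc
        have hpre : List.isPrefixOf ['.'] ('.' :: rest) = true := by
          simp [List.isPrefixOf]
        rw [if_pos hpre]
        simp only [List.length_cons, List.length_nil, List.drop_succ_cons, List.drop_zero]
        rw [ih rest [] (cur.reverse :: acc) (by simpa using Nat.lt_of_succ_lt_succ hf)]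
        simp [pvTok]
      · have hpre : List.isPrefixOf ['.'] (c :: rest) = false := by
          simp [List.isPrefixOf]
          exact fun h => hc h.symm
        simp only [hpre, Bool.false_eq_true, if_false]
        rw [ih rest (c :: cur) acc (by simpa using Nat.lt_of_succ_lt_succ hf)]
        simp [pvTok, hc]

theorem split_eq_tok (s : String) :
    PySem.Str.split? s "." = some ((pvTok [] s.toList).map String.ofList) := by
  have : PySem.Chars.splitOn s.toList ['.'] = pvTok [] s.toList := by
    rw [PySem.Chars.splitOn, go_eq_tok (s.toList.length + 1) s.toList [] [] (Nat.lt_succ_self _)]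
    simp
  simp [PySem.Str.split?, PySem.Chars.split?, this]

theorem tok_no_dot (l cur : List Char) (h : ('.' : Char) ∉ l) :
    pvTok cur l = [cur ++ l] := by
  induction l generalizing cur with
  | nil => simp [pvTok]
  | cons c rest ih =>
    have hc : c ≠ '.' := fun hc => h (hc ▸ List.mem_cons_self)
    rw [pvTok, if_neg hc, ih _ (fun hm => h (List.mem_cons_of_mem _ hm))]
    simp

-- B's inner character fold, closed by the final add, adds exactly the tokens.
theorem tokfold (l : List Char) (s : PySem.Set String) (cur : List Char) :
    PySem.Set.add
      (l.foldl
        (fun (p : PySem.Set String × List Char) ch =>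
          if ch = '.' then (PySem.Set.add p.1 (String.ofList p.2), [])
          else (p.1, p.2 ++ [ch]))
        (s, cur)).1
      (String.ofList
        (l.foldl
          (fun (p : PySem.Set String × List Char) ch =>
            if ch = '.' then (PySem.Set.add p.1 (String.ofList p.2), [])
            else (p.1, p.2 ++ [ch]))
          (s, cur)).2)
    = List.foldl PySem.Set.add s ((pvTok cur l).map String.ofList) := by
  induction l generalizing s cur with
  | nil => simp [pvTok]
  | cons c rest ih =>
    by_cases hc : c = '.'
    · simp only [List.foldl_cons, hc, pvTok, List.foldl_cons]
      exact ih _ _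
    · simp only [List.foldl_cons, if_neg hc, pvTok]
      rw [ih _ _]

-- A's per-link step also adds exactly the tokens.
theorem astep (s : PySem.Set String) (link : String) :
    (if PySem.Str.isIn "." link then
        PySem.Set.update s ((PySem.Str.split? link ".").getD [])
      else PySem.Set.add s link)
    = List.foldl PySem.Set.add s ((pvTok [] link.toList).map String.ofList) := by
  by_cases h : PySem.Str.isIn "." link = true
  · rw [if_pos h, split_eq_tok]
    rfl
  · have hmem : ('.' : Char) ∉ link.toList := by
      intro hm
      have hinf : ['.'] <:+: link.toList := by
        obtain ⟨pre, suf, hps⟩ := List.append_of_mem hm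
        exact ⟨pre, suf, by simp [hps]⟩
      have h' : PySem.Chars.isIn ['.'] link.toList = false := by
        simpa [PySem.Str.isIn] using (Bool.not_eq_true _ ▸ eq_false_of_ne_true h)
      exact (PySem.Chars.isIn_eq_false_iff _ _).mp h' hinf
    rw [if_neg h, tok_no_dot _ _ hmem]
    simp [String.ofList_toList]

-- ===== VERDICT (by name: the statement is the Claim_ definition above) =====
theorem convert_schema_links_to_set_spec : Claim_equal_convert_schema_links_to_set := by
  intro schema_links _
  unfold Spec_convert_schema_links_to_set convert_schema_links_to_set convert_schema_links_to_set_alt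
  have hfun :
      (fun (schema_set : PySem.Set String) (link : String) =>
        if PySem.Str.isIn "." link then
          PySem.Set.update schema_set ((PySem.Str.split? link ".").getD [])
        else PySem.Set.add schema_set link)
      = (fun (schema_set : PySem.Set String) (link : String) =>
          let st := link.toList.foldl
            (fun (p : PySem.Set String × List Char) ch =>
              if ch = '.' then (PySem.Set.add p.1 (String.ofList p.2), [])
              else (p.1, p.2 ++ [ch]))
            (schema_set, [])
          PySem.Set.add st.1 (String.ofList st.2)) := by
    funext s link
    exact (astep s link).trans (tokfold link.toList s []).symm
  rw [hfun]
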